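-- pv_equiv track=rewrite | github.com/TeamSparta-Inc/sparta-algorithm-study | programmers/서버 증설 횟수/sangyeopchae.py | solution
-- ===== SOURCE A (Python) =====
-- def solution(players, m, k):
--     answer = 0
--     servers = [0] * len(players)
--
--     for i, player_count in enumerate(players):
--         if player_count >= m:
--             needed_servers = (player_count // m) - servers[i]
--             if needed_servers > 0:
--                 # k 범위만큼 서버 증설
--                 for j in range(k):
--                     if i + j < len(players):
--                         servers[i + j] += needed_servers
--                 answer += needed_servers
--
--     return answer
-- ===== SOURCE B (Python) =====
-- def solution(players, m, k):
--     n = len(players)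
--     expire = [0] * (n + 1)   # expire[t]: (negative) change to active capacity entering hour t
--     active = 0
--     answer = 0
--     for i, p in enumerate(players):
--         active += expire[i]
--         if p >= m:
--             needed = p // m - active
--             if needed > 0:
--                 answer += needed
--                 if k > 0:
--                     active += needed
--                     expire[min(i + k, n)] -= needed
--     return answer
-- ===== Notes on version B (the rewrite author's own statement) =====
-- stated objective: faster
-- what changed: Replaces A's O(n*k) inner loop that adds the new servers to each of the next k slots with a single-pass difference array: a running count of active servers plus an expiration array updated once per increment.
import Mathlib
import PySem

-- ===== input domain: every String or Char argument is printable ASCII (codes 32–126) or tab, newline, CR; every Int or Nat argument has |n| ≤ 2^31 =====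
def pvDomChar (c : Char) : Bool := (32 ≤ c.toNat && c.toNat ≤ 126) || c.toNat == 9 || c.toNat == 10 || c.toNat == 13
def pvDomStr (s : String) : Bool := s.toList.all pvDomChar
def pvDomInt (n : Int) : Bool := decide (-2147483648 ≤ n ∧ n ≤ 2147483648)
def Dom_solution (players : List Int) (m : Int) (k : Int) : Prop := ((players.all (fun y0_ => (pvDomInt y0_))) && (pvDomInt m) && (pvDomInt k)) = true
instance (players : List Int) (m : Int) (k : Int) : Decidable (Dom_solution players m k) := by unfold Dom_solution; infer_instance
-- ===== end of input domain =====

-- B replaces A's O(n*k) "add the new servers to each of the next k slots" inner loop by a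
-- single-pass difference array (running active count + expiration deltas); return values proved equal.

-- ===== PORT A =====
-- servers[u] += v (u is always a nonnegative in-range index at every use site)
def addAt (e : List Int) (u : Int) (v : Int) : List Int :=
  PySem.List.pySetD e u (PySem.List.pyGetD e u 0 + v)

-- 'for j in range(k): if i + j < len(players): servers[i+j] += needed'
def aInner (n i needed : Int) (servers : List Int) (k : Int) : List Int :=
  (PySem.List.pyRange 0 k 1).foldl
    (fun sv j => if i + j < n then addAt sv (i + j) needed else sv) servers

-- the 'for i, player_count in enumerate(players)' loop; i is the enumerate counter
def aLoop (m k n : Int) (i ans : Int) (servers : List Int) : List Int → Int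
  | [] => ans
  | p :: rest =>
    if p ≥ m then
      let needed := PySem.Int.floordiv p m - PySem.List.pyGetD servers i 0
      if needed > 0 then
        aLoop m k n (i + 1) (ans + needed) (aInner n i needed servers k) rest
      else aLoop m k n (i + 1) ans servers rest
    else aLoop m k n (i + 1) ans servers rest

def solution (players : List Int) (m : Int) (k : Int) : Int :=
  aLoop m k (players.length : Int) 0 0 (List.replicate players.length 0) players

-- ===== PORT B =====
-- the 'for i, p in enumerate(players)' loop of Source B; state = (ans, active, expire)
def bLoop (m k n : Int) (i ans active : Int) (expire : List Int) : List Int → Int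
  | [] => ans
  | p :: rest =>
    let active' := active + PySem.List.pyGetD expire i 0
    if p ≥ m then
      let needed := PySem.Int.floordiv p m - active'
      if needed > 0 then
        if k > 0 then
          bLoop m k n (i + 1) (ans + needed) (active' + needed)
            (addAt expire (min (i + k) n) (-needed)) rest
        else
          bLoop m k n (i + 1) (ans + needed) active' expire rest
      else bLoop m k n (i + 1) ans active' expire rest
    else bLoop m k n (i + 1) ans active' expire rest

def solution_alt (players : List Int) (m : Int) (k : Int) : Int :=
  bLoop m k (players.length : Int) 0 0 0 (List.replicate (players.length + 1) 0) players

-- ===== PRECONDITION & SPEC =====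
-- Pre_ excludes exactly the inputs on which the Python A raises ZeroDivisionError
-- (m = 0 while some player count is ≥ 0, so 'player_count // m' is reached).
def Pre_solution (players : List Int) (m : Int) (_k : Int) : Prop :=
  m ≠ 0 ∨ ∀ p ∈ players, p < 0
instance (players : List Int) (m : Int) (k : Int) : Decidable (Pre_solution players m k) := by
  unfold Pre_solution; infer_instance

def pvWitness_solution : List Int × Int × Int := ([5, 1, 8, 4], 2, 2)

def Spec_solution (players : List Int) (m : Int) (k : Int) (out : Int) : Prop := out = solution_alt players m k
instance (players : List Int) (m : Int) (k : Int) (out : Int) : Decidable (Spec_solution players m k out) := by unfold Spec_solution; infer_instance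

-- ===== CLAIM (what is proved, stated in full; the proofs are below) =====
def Claim_equal_solution : Prop := ∀ (players : List Int) (m : Int) (k : Int), Dom_solution players m k → Pre_solution players m k → Spec_solution players m k (solution players m k)

-- ===== LEMMAS AND PROOFS =====

-- sum of expire[a..b-1]
def ssum (e : List Int) (a b : Int) : Int :=
  ((PySem.List.pyRange a b 1).map (fun j => PySem.List.pyGetD e j 0)).sum

lemma ssum_nil (e : List Int) {a b : Int} (h : b ≤ a) : ssum e a b = 0 := by
  simp [ssum, PySem.List.pyRange_one_eq_nil h]

lemma ssum_cons (e : List Int) {a b : Int} (h : a < b) :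
    ssum e a b = PySem.List.pyGetD e a 0 + ssum e (a + 1) b := by
  rw [ssum, PySem.List.pyRange_one_cons h]; simp [ssum]

lemma getD_replicate_zero (n j : Nat) : (List.replicate n (0:Int)).getD j 0 = 0 := by
  by_cases h : j < n <;> simp [List.getD, h]

lemma length_addAt (e : List Int) (u v : Int) : (addAt e u v).length = e.length := by
  simp [addAt, PySem.List.length_pySetD]

lemma getD_addAt (e : List Int) {u t : Int} (v : Int) (hu0 : 0 ≤ u) (hu : u < (e.length : Int))
    (ht0 : 0 ≤ t) :
    PySem.List.pyGetD (addAt e u v) t 0 =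
      PySem.List.pyGetD e t 0 + (if t = u then v else 0) := by
  rw [addAt, PySem.List.pySetD_of_nonneg _ _ hu0,
      PySem.List.pyGetD_of_nonneg _ _ ht0, PySem.List.pyGetD_of_nonneg _ _ ht0,
      PySem.List.pyGetD_of_nonneg _ _ hu0]
  by_cases h : t = u
  · subst h
    have hlt : t.toNat < e.length := by omega
    simp [List.getD, List.getElem?_set_self hlt]
  · have hne : u.toNat ≠ t.toNat := by omega
    simp [List.getD, List.getElem?_set_ne hne, h]

lemma ssum_addAt (e : List Int) (v : Int) {u : Int} (hu0 : 0 ≤ u) (hu : u < (e.length : Int)) :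
    ∀ (d : Nat) (a : Int), 0 ≤ a →
      ssum (addAt e u v) a (a + d) =
        ssum e a (a + d) + (if a ≤ u ∧ u < a + d then v else 0) := by
  intro d
  induction d with
  | zero =>
    intro a ha
    rw [ssum_nil _ (by omega), ssum_nil _ (by omega)]
    split_ifs <;> omega
  | succ d ih =>
    intro a ha
    have h1 : a < a + (d + 1 : Nat) := by omega
    rw [ssum_cons _ h1, ssum_cons _ h1, getD_addAt e v hu0 hu ha]
    have : (a + 1) + (d : Int) = a + ((d + 1 : Nat) : Int) := by push_cast; ring
    have h2 := ih (a + 1) (by omega)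
    rw [this] at h2
    rw [h2]
    split_ifs <;> omega

lemma length_aInner (n i needed k : Int) (servers : List Int) :
    (aInner n i needed servers k).length = servers.length := by
  rw [aInner]
  generalize PySem.List.pyRange 0 k 1 = js
  induction js generalizing servers with
  | nil => rfl
  | cons j js ih =>
    simp only [List.foldl_cons]
    rw [ih]
    split <;> simp [length_addAt]

lemma getD_aInner (n i needed : Int) (servers : List Int) (hn : (servers.length : Int) = n)
    (hi : 0 ≤ i) {t : Int} (ht0 : 0 ≤ t) (htn : t < n) :
    ∀ (K : Nat),
      PySem.List.pyGetD (aInner n i needed servers (K : Int)) t 0 =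
        PySem.List.pyGetD servers t 0 + (if i ≤ t ∧ t < i + K then needed else 0) := by
  intro K
  induction K with
  | zero =>
    rw [aInner, PySem.List.pyRange_one_eq_nil (by omega)]
    simp only [List.foldl_nil, Nat.cast_zero]
    split_ifs <;> omega
  | succ K ih =>
    have hsplit : PySem.List.pyRange 0 ((K + 1 : Nat) : Int) 1 =
        PySem.List.pyRange 0 (K : Int) 1 ++ [(K : Int)] := by
      have := PySem.List.pyRange_one_succ_right (a := 0) (b := (K : Int)) (by omega)
      push_cast
      push_cast at this
      exact this
    rw [aInner, hsplit, List.foldl_append]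
    have hback : (PySem.List.pyRange 0 (K:Int) 1).foldl
        (fun sv j => if i + j < n then addAt sv (i + j) needed else sv) servers
        = aInner n i needed servers (K : Int) := by rw [aInner]
    rw [List.foldl_cons, List.foldl_nil, hback]
    have hlen : ((aInner n i needed servers (K:Int)).length : Int) = n := by
      rw [length_aInner]; exact hn
    by_cases hg : i + (K : Int) < n
    · rw [if_pos hg, getD_addAt _ needed (by omega) (by omega) ht0, ih]
      split_ifs <;> omega
    · rw [if_neg hg, ih]
      split_ifs <;> omega

lemma loop_eq (m k n : Int) :
    ∀ (l : List Int) (i ans active : Int) (servers expire : List Int),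
      0 ≤ i → i + (l.length : Int) = n →
      (servers.length : Int) = n → (expire.length : Int) = n + 1 →
      (∀ t : Int, i ≤ t → t < n →
        PySem.List.pyGetD servers t 0 = active + ssum expire i (t + 1)) →
      aLoop m k n i ans servers l = bLoop m k n i ans active expire l := by
  intro l
  induction l with
  | nil => intro i ans active servers expire _ _ _ _ _; rfl
  | cons p rest ih =>
    intro i ans active servers expire hi hlen hsl hel hinv
    have hin : i < n := by
      have := hlen; simp only [List.length_cons] at this; push_cast at this; omega
    have hservi : PySem.List.pyGetD servers i 0 = active + PySem.List.pyGetD expire i 0 := by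
      have := hinv i (le_refl i) hin
      rw [ssum_cons _ (by omega), ssum_nil _ (by omega)] at this
      omega
    have hlen' : (i + 1) + (rest.length : Int) = n := by
      simp only [List.length_cons] at hlen; push_cast at hlen ⊢; omega
    have hinv' : ∀ t : Int, i + 1 ≤ t → t < n →
        PySem.List.pyGetD servers t 0 =
          (active + PySem.List.pyGetD expire i 0) + ssum expire (i + 1) (t + 1) := by
      intro t ht1 ht2
      have := hinv t (by omega) ht2
      rw [ssum_cons _ (by omega)] at this
      omega
    simp only [aLoop, bLoop]
    by_cases hp : p ≥ m
    · rw [if_pos hp, if_pos hp]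
      rw [hservi]
      set needed := PySem.Int.floordiv p m - (active + PySem.List.pyGetD expire i 0) with hneed
      by_cases hnp : needed > 0
      · rw [if_pos hnp, if_pos hnp]
        by_cases hk : k > 0
        · rw [if_pos hk]
          apply ih _ _ _ _ _ (by omega) hlen'
          · rw [length_aInner]; exact hsl
          · rw [length_addAt]; exact hel
          · -- re-establish the invariant after the triggered step
            intro t ht1 ht2
            have hkk : ((k.toNat : Nat) : Int) = k := by omega
            have hInA := getD_aInner n i needed servers hsl hi (t := t) (by omega) ht2 k.toNat
            rw [hkk] at hInA
            have he0 : (0:Int) ≤ min (i + k) n := by omega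
            have he1 : min (i + k) n < (expire.length : Int) := by omega
            have hsa := ssum_addAt expire (-needed) he0 he1 (t - i).toNat (i + 1) (by omega)
            have hcast : (i + 1) + (((t - i).toNat : Nat) : Int) = t + 1 := by omega
            rw [hcast] at hsa
            rw [hInA, hsa, hinv' t ht1 ht2]
            split_ifs <;> omega
        · rw [if_neg hk]
          have haux : aInner n i needed servers k = servers := by
            rw [aInner, PySem.List.pyRange_one_eq_nil (by omega)]; rfl
          rw [haux]
          exact ih _ _ _ _ _ (by omega) hlen' hsl hel hinv'
      · rw [if_neg hnp, if_neg hnp]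
        exact ih _ _ _ _ _ (by omega) hlen' hsl hel hinv'
    · rw [if_neg hp, if_neg hp]
      exact ih _ _ _ _ _ (by omega) hlen' hsl hel hinv'

-- ===== VERDICT (by name: the statement is the Claim_ definition above) =====
theorem solution_spec : Claim_equal_solution := by
  intro players m k _ _
  unfold Spec_solution solution solution_alt
  apply loop_eq
  · omega
  · simp
  · simp
  · simp
  · intro t ht0 htn
    rw [PySem.List.pyGetD_of_nonneg _ _ (by omega)]
    have hr : ssum (List.replicate (players.length + 1) 0) 0 (t + 1) = 0 := by
      have : ∀ (d : Nat) (a : Int), 0 ≤ a →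
          ssum (List.replicate (players.length + 1) (0:Int)) a (a + d) = 0 := by
        intro d
        induction d with
        | zero => intro a ha; rw [ssum_nil _ (by omega)]
        | succ d ihd =>
          intro a ha
          rw [ssum_cons _ (by omega), PySem.List.pyGetD_of_nonneg _ _ ha]
          have : (a + 1) + (d : Int) = a + ((d + 1 : Nat) : Int) := by push_cast; ring
          have h2 := ihd (a + 1) (by omega)
          rw [this] at h2
          rw [getD_replicate_zero]
          omega
      have h3 := this (t + 1).toNat 0 (le_refl 0)
      have : (0:Int) + ((t + 1).toNat : Int) = t + 1 := by omega
      rw [this] at h3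
      exact h3
    rw [hr]
    rw [getD_replicate_zero]
    omega
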